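-- pv_equiv track=rewrite | github.com/matthewmulligan7/notable-backend | api/common/utils.py | check_only
-- ===== SOURCE A (Python) =====
-- from typing import Dict, List
--
-- def check_any(request, anylist: List):
--     """
--     Checks to see if at least one of list members are in the request
--     Args:
--         request (request): request.json or request.args
--         any (list): A list of parameters to check for in the request
--     Returns:
--         boolean:  Returns True on any member found in list
--     """
--     exists = False
--     try:
--         for key in anylist:
--             if key in request:
--                 exists = True
--         return exists
--     except:
--         return False
--
-- def check_only(request, onlylist: List):
--     """
--     Checks to see if only at the list members are in the request
--     Args:
--         request (request): request.json or request.args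
--         any (list): A list of parameters to check for in the request
--     Returns:
--         boolean:  Returns True on any member found in list
--     """
--     allowed = True
--     if check_any(request, onlylist):
--         try:
--             for k, v in request.items():
--                 if k not in onlylist:
--                     allowed = False
--             return allowed
--         except:
--             return False
--     return False
-- ===== SOURCE B (Python) =====
-- def check_only(request, onlylist):
--     try:
--         keys = set(request)
--         return bool(keys) and keys.issubset(onlylist)
--     except:
--         return False
-- ===== Notes on version B (the rewrite author's own statement) =====
-- stated objective: faster
-- what changed: Replaced the check_any helper's scan over onlylist (each step scanning request) plus the second accumulator loop over request.items() with a single set-subset test: non-empty key set and keys.issubset(onlylist).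
import Mathlib
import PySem

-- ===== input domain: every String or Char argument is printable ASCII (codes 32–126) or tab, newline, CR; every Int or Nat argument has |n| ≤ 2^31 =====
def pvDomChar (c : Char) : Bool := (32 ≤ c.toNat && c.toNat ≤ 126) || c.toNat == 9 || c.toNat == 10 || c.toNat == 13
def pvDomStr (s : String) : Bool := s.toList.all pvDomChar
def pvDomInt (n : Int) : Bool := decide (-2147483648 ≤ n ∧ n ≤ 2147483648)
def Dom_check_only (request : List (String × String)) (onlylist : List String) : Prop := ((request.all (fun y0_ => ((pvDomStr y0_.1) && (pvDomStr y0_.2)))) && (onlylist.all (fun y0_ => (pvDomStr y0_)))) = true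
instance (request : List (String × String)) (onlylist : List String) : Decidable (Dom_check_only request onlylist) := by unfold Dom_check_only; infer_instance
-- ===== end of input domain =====

-- B replaces A's two accumulator loops (check_any over onlylist with an inner scan of request, then the scan over request.items()) by one set-subset test: non-empty key set and keys ⊆ onlylist; measurably faster.
-- ===== PORT A =====
def check_any (request : List (String × String)) (anylist : List String) : Bool :=
  anylist.foldl (fun ex key => if request.any (fun kv => kv.1 == key) then true else ex) false

def check_only (request : List (String × String)) (onlylist : List String) : Bool :=
  if check_any request onlylist then
    request.foldl (fun allowed kv => if !(onlylist.contains kv.1) then false else allowed) true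
  else false

-- ===== PORT B =====
def check_only_alt (request : List (String × String)) (onlylist : List String) : Bool :=
  let keys : PySem.Set String := PySem.Set.ofList (request.map Prod.fst)
  !keys.isEmpty && PySem.Set.issubset keys onlylist

-- ===== PRECONDITION & SPEC =====
def Spec_check_only (request : List (String × String)) (onlylist : List String) (out : Bool) : Prop := out = check_only_alt request onlylist
instance (request : List (String × String)) (onlylist : List String) (out : Bool) : Decidable (Spec_check_only request onlylist out) := by unfold Spec_check_only; infer_instance

-- ===== CLAIM (what is proved, stated in full; the proofs are below) =====
def Claim_equal_check_only : Prop := ∀ (request : List (String × String)) (onlylist : List String), Dom_check_only request onlylist → Spec_check_only request onlylist (check_only request onlylist)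

-- ===== LEMMAS AND PROOFS =====

-- ===== VERDICT (by name: the statement is the Claim_ definition above) =====
-- check_any's accumulator loop: true iff some key of onlylist is a key of request
lemma check_any_eq (r : List (String × String)) (o : List String) (init : Bool) :
    o.foldl (fun ex key => if r.any (fun kv => kv.1 == key) then true else ex) init
      = (init || o.any (fun key => r.any (fun kv => kv.1 == key))) := by
  induction o generalizing init with
  | nil => simp
  | cons x xs ih =>
      simp only [List.foldl_cons, List.any_cons, ih]
      cases h : r.any (fun kv => kv.1 == x) <;> simp

-- the second accumulator loop: true iff every request key is allowed
lemma allowed_loop_eq (r : List (String × String)) (o : List String) (init : Bool) :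
    r.foldl (fun allowed kv => if !(o.contains kv.1) then false else allowed) init
      = (init && r.all (fun kv => o.contains kv.1)) := by
  induction r generalizing init with
  | nil => simp
  | cons x xs ih =>
      simp only [List.foldl_cons, List.all_cons, ih]
      cases h : o.contains x.1 <;> simp

theorem check_only_spec : Claim_equal_check_only := by
  intro r o _
  unfold Spec_check_only check_only check_only_alt check_any
  rw [check_any_eq, allowed_loop_eq]
  simp only [Bool.false_or, Bool.true_and]
  by_cases hc : o.any (fun key => r.any (fun kv => kv.1 == key)) = true
  · -- some allowed key occurs in the request, hence the request is non-empty
    rw [if_pos hc]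
    obtain ⟨key, hk, hkany⟩ := List.any_eq_true.mp hc
    obtain ⟨kv, hkv, hkvk⟩ := List.any_eq_true.mp hkany
    have hmem : kv.1 ∈ PySem.Set.ofList (r.map Prod.fst) := by
      rw [PySem.Set.mem_ofList]; exact List.mem_map_of_mem hkv
    have hE : (PySem.Set.ofList (r.map Prod.fst)).isEmpty = false := by
      rw [List.isEmpty_eq_false_iff]
      intro h; rw [h] at hmem; simp at hmem
    rw [hE]
    simp only [Bool.not_false, Bool.true_and]
    rw [Bool.eq_iff_iff]
    simp only [List.all_eq_true, PySem.Set.issubset_iff, PySem.Set.mem_ofList,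
      List.mem_map, List.contains_iff_mem]
    constructor
    · rintro hall x ⟨q, hq, rfl⟩
      exact hall q hq
    · intro hsub p hp
      exact hsub p.1 ⟨p, hp, rfl⟩
  · -- no allowed key occurs in the request: both sides are false
    rw [if_neg hc]
    symm
    rw [Bool.and_eq_false_iff]
    by_cases hr : r = []
    · subst hr; left; simp [PySem.Set.ofList]
    · right
      rw [Bool.eq_false_iff]
      intro hsub
      apply hc
      rw [PySem.Set.issubset_iff] at hsub
      obtain ⟨p, hp⟩ := List.exists_mem_of_ne_nil r hr
      have hpo : p.1 ∈ o := hsub p.1 (by rw [PySem.Set.mem_ofList]; exact List.mem_map_of_mem hp)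
      rw [List.any_eq_true]
      exact ⟨p.1, hpo, List.any_eq_true.mpr ⟨p, hp, by simp⟩⟩
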